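-- pv_equiv track=rewrite | github.com/PriyankaJadhav1108/NLP_Integrated_CRM | nlpcrmzip/nlpcrm/personality_negotiator.py | _make_indirect
-- ===== SOURCE A (Python) =====
-- def _make_indirect(message: str) -> str:
--     """Make message more indirect and polite"""
--     indirect_phrases = {
--         'I need': 'I would appreciate',
--         'You must': 'It would be helpful if',
--         'This is required': 'This would be beneficial',
--         'You should': 'I would suggest'
--     }
--
--     for direct, indirect in indirect_phrases.items():
--         message = message.replace(direct, indirect)
--
--     return message
-- ===== SOURCE B (Python) =====
-- def _make_indirect(message: str) -> str:
--     """Make message more indirect and polite (single left-to-right scan)."""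
--     phrases = [
--         ('I need', 'I would appreciate'),
--         ('You must', 'It would be helpful if'),
--         ('This is required', 'This would be beneficial'),
--         ('You should', 'I would suggest'),
--     ]
--     out = []
--     i = 0
--     n = len(message)
--     while i < n:
--         for direct, indirect in phrases:
--             if message.startswith(direct, i):
--                 out.append(indirect)
--                 i += len(direct)
--                 break
--         else:
--             out.append(message[i])
--             i += 1
--     return ''.join(out)
-- ===== Notes on version B (the rewrite author's own statement) =====
-- stated objective: alternative
-- what changed: A makes four full passes over the string, one str.replace per phrase; B makes a single left-to-right scan that tries the four direct phrases at each position and copies a character when none matches.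
import Mathlib
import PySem

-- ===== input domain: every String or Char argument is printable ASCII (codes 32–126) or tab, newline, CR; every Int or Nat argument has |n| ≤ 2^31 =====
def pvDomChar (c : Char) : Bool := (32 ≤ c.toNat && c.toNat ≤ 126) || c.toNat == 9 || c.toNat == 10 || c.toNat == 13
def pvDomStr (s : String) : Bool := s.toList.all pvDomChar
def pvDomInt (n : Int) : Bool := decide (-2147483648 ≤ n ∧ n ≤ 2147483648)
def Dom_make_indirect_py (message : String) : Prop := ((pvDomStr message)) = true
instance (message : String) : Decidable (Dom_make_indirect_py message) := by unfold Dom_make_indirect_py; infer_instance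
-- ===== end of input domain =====

set_option maxRecDepth 8192


-- B replaces A's four full str.replace passes over the string by ONE left-to-right scan
-- that tries the four direct phrases at each position (alternative single-pass rewriting).

-- ===== PORT A =====
-- literal port of A: the dict loop unrolls, in insertion order, to four successive
-- message.replace(direct, indirect) passes
def make_indirect_py (message : String) : String :=
  PySem.Str.replace
    (PySem.Str.replace
      (PySem.Str.replace
        (PySem.Str.replace message "I need" "I would appreciate")
        "You must" "It would be helpful if")
      "This is required" "This would be beneficial")
    "You should" "I would suggest"

-- ===== PORT B =====
-- single scan over the characters (Source B's while loop): at each position try the four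
-- phrases in order; on a match emit the indirect phrase and skip len(direct) characters,
-- else copy one character
def altScan : List Char → List Char
  | [] => []
  | c :: t =>
    if ("I need".toList).isPrefixOf (c :: t) then
      "I would appreciate".toList ++ altScan (List.drop 6 (c :: t))
    else if ("You must".toList).isPrefixOf (c :: t) then
      "It would be helpful if".toList ++ altScan (List.drop 8 (c :: t))
    else if ("This is required".toList).isPrefixOf (c :: t) then
      "This would be beneficial".toList ++ altScan (List.drop 16 (c :: t))
    else if ("You should".toList).isPrefixOf (c :: t) then
      "I would suggest".toList ++ altScan (List.drop 10 (c :: t))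
    else c :: altScan t
termination_by l => l.length
decreasing_by all_goals simp

def make_indirect_py_alt (message : String) : String :=
  String.ofList (altScan message.toList)

-- ===== PRECONDITION & SPEC =====
def Spec_make_indirect_py (message : String) (out : String) : Prop := out = make_indirect_py_alt message
instance (message : String) (out : String) : Decidable (Spec_make_indirect_py message out) := by unfold Spec_make_indirect_py; infer_instance

-- ===== CLAIM (what is proved, stated in full; the proofs are below) =====
def Claim_equal_make_indirect_py : Prop := ∀ (message : String), Dom_make_indirect_py message → Spec_make_indirect_py message (make_indirect_py message)

-- ===== LEMMAS AND PROOFS =====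

-- tails of the four direct phrases and of their replacements, as char-list literals
def K1t : List Char := [' ', 'n', 'e', 'e', 'd']
def R1t : List Char := [' ', 'w', 'o', 'u', 'l', 'd', ' ', 'a', 'p', 'p', 'r', 'e', 'c', 'i', 'a', 't', 'e']
def K2t : List Char := ['o', 'u', ' ', 'm', 'u', 's', 't']
def R2t : List Char := ['t', ' ', 'w', 'o', 'u', 'l', 'd', ' ', 'b', 'e', ' ', 'h', 'e', 'l', 'p', 'f', 'u', 'l', ' ', 'i', 'f']
def K3t : List Char := ['h', 'i', 's', ' ', 'i', 's', ' ', 'r', 'e', 'q', 'u', 'i', 'r', 'e', 'd']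
def R3t : List Char := ['h', 'i', 's', ' ', 'w', 'o', 'u', 'l', 'd', ' ', 'b', 'e', ' ', 'b', 'e', 'n', 'e', 'f', 'i', 'c', 'i', 'a', 'l']
def K4t : List Char := ['o', 'u', ' ', 's', 'h', 'o', 'u', 'l', 'd']
def R4t : List Char := [' ', 'w', 'o', 'u', 'l', 'd', ' ', 's', 'u', 'g', 'g', 'e', 's', 't']
theorem eK1 : "I need".toList = 'I' :: K1t := rfl
theorem eR1 : "I would appreciate".toList = 'I' :: R1t := rfl
theorem eK2 : "You must".toList = 'Y' :: K2t := rfl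
theorem eR2 : "It would be helpful if".toList = 'I' :: R2t := rfl
theorem eK3 : "This is required".toList = 'T' :: K3t := rfl
theorem eR3 : "This would be beneficial".toList = 'T' :: R3t := rfl
theorem eK4 : "You should".toList = 'Y' :: K4t := rfl
theorem eR4 : "I would suggest".toList = 'I' :: R4t := rfl

-- one replace pass, in scanning form (proof-side view of PySem.Chars.replace for a nonempty pattern)
def repOne (k0 : Char) (ks rep : List Char) : List Char → List Char
  | [] => []
  | c :: t =>
    if (k0 :: ks).isPrefixOf (c :: t) then
      rep ++ repOne k0 ks rep (List.drop (k0 :: ks).length (c :: t))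
    else c :: repOne k0 ks rep t
termination_by l => l.length
decreasing_by all_goals simp

theorem go_spec (k0 : Char) (ks rep : List Char) (fuel : Nat) (l acc : List Char)
    (h : l.length ≤ fuel) :
    PySem.Chars.replace.go (k0 :: ks) rep fuel l acc = acc.reverse ++ repOne k0 ks rep l := by
  induction fuel generalizing l acc with
  | zero =>
    have hl : l = [] := by cases l with | nil => rfl | cons a t => simp at h
    subst hl
    rw [PySem.Chars.replace.go.eq_def]
    simp [repOne]
  | succ fuel ih =>
    match l with
    | [] =>
      rw [PySem.Chars.replace.go.eq_def]
      simp [repOne]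
    | c :: t =>
      rw [PySem.Chars.replace.go.eq_def]
      dsimp only
      by_cases hp : (k0 :: ks).isPrefixOf (c :: t) = true
      · rw [if_pos hp, ih _ _ (by simp at h ⊢; omega)]
        rw [repOne, if_pos hp]
        simp
      · rw [if_neg hp, ih _ _ (by simp at h; omega)]
        rw [repOne, if_neg hp]
        simp

theorem replace_eq_repOne (k0 : Char) (ks rep l : List Char) :
    PySem.Chars.replace l (k0 :: ks) rep = repOne k0 ks rep l := by
  rw [PySem.Chars.replace]
  simp [go_spec k0 ks rep l.length l [] (le_refl _)]

-- a scan step at a position where the pattern does not match copies one character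
theorem repOne_step (k0 : Char) (ks rep : List Char) (c : Char) (t : List Char)
    (h : ¬ ((k0 :: ks).isPrefixOf (c :: t) = true)) :
    repOne k0 ks rep (c :: t) = c :: repOne k0 ks rep t := by
  rw [repOne, if_neg h]

-- the scan cannot fire inside a block avoiding the pattern's first character
theorem repOne_append_absent (k0 : Char) (ks rep p x : List Char)
    (h : ∀ c ∈ p, c ≠ k0) :
    repOne k0 ks rep (p ++ x) = p ++ repOne k0 ks rep x := by
  induction p with
  | nil => simp
  | cons a p ih =>
    have ha : a ≠ k0 := h a (by simp)
    rw [List.cons_append, repOne_step _ _ _ _ _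
      (by simp [List.isPrefixOf]; intro hk; exact absurd hk.symm ha)]
    simp [ih (fun c hc => h c (by simp [hc]))]

theorem repOne_fire (k0 : Char) (ks rep x : List Char) :
    repOne k0 ks rep ((k0 :: ks) ++ x) = rep ++ repOne k0 ks rep x := by
  rw [List.cons_append, repOne, if_pos (by simp [List.isPrefixOf_iff_prefix])]
  have : List.drop (k0 :: ks).length (k0 :: (ks ++ x)) = x := by simp
  rw [this]

-- a prefix test for a word avoiding both the pattern's and the replacement's first
-- character is unchanged by one replace pass
theorem prefix_stable (k0 r0 : Char) (ks rs : List Char) (t : List Char) :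
    ∀ m : List Char, (∀ c ∈ m, c ≠ k0 ∧ c ≠ r0) →
      m.isPrefixOf (repOne k0 ks (r0 :: rs) t) = m.isPrefixOf t := by
  induction t using repOne.induct k0 ks with
  | case1 => intro m hm; simp [repOne]
  | case2 c t hp ih =>
    intro m hm
    rw [repOne, if_pos hp]
    match m with
    | [] => rfl
    | m0 :: m' =>
      have h0 := hm m0 (by simp)
      have hk : k0 = c := by
        have h := hp; simp [List.isPrefixOf] at h; exact h.1
      subst hk
      have e1 : (m0 == r0) = false := beq_eq_false_iff_ne.mpr h0.2
      have e2 : (m0 == k0) = false := beq_eq_false_iff_ne.mpr h0.1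
      simp [List.isPrefixOf, e1, e2]
  | case3 c t hp ih =>
    intro m hm
    rw [repOne, if_neg hp]
    match m with
    | [] => rfl
    | m0 :: m' =>
      simp [List.isPrefixOf, ih m' (fun c hc => (hm c (by simp [hc])))]

theorem prefix_stable_cons (k0 r0 : Char) (ks rs : List Char) (hd m0 : Char) (m : List Char)
    (hm : ∀ c ∈ m, c ≠ k0 ∧ c ≠ r0) (t : List Char) :
    (m0 :: m).isPrefixOf (hd :: repOne k0 ks (r0 :: rs) t)
      = (m0 :: m).isPrefixOf (hd :: t) := by
  simp only [List.isPrefixOf, prefix_stable k0 r0 ks rs t m hm]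

-- the four passes of A, in scanning form
def rep1 (l : List Char) : List Char := repOne 'I' K1t ('I' :: R1t) l
def rep2 (l : List Char) : List Char := repOne 'Y' K2t ('I' :: R2t) l
def rep3 (l : List Char) : List Char := repOne 'T' K3t ('T' :: R3t) l
def rep4 (l : List Char) : List Char := repOne 'Y' K4t ('I' :: R4t) l

-- the "You must" pass walks over a "You should" block without firing
theorem rep2_skips_K4 (x : List Char) :
    repOne 'Y' K2t ('I' :: R2t) (('Y' :: K4t) ++ x)
      = ('Y' :: K4t) ++ repOne 'Y' K2t ('I' :: R2t) x := by
  rw [List.cons_append, repOne_step _ _ _ _ _ (by simp [List.isPrefixOf, K2t, K4t])]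
  rw [repOne_append_absent 'Y' K2t _ K4t _ (by simp [K4t])]
  simp

theorem master (l : List Char) : rep4 (rep3 (rep2 (rep1 l))) = altScan l := by
  induction l using altScan.induct with
  | case1 => simp [rep1, rep2, rep3, rep4, repOne, altScan]
  | case2 c t h1 ih =>
    -- "I need" fires at this position
    obtain ⟨x, hx⟩ := List.isPrefixOf_iff_prefix.mp h1
    rw [eK1] at hx
    have hdrop : List.drop 6 (c :: t) = x := by rw [← hx]; rfl
    rw [hdrop] at ih
    rw [altScan, if_pos h1, hdrop, ← hx, eR1]
    simp only [rep1, rep2, rep3, rep4] at ih ⊢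
    rw [repOne_fire,
        repOne_append_absent 'Y' K2t _ ('I' :: R1t) _ (by simp [R1t]),
        repOne_append_absent 'T' K3t _ ('I' :: R1t) _ (by simp [R1t]),
        repOne_append_absent 'Y' K4t _ ('I' :: R1t) _ (by simp [R1t]), ih]
  | case3 c t h1 h2 ih =>
    -- "You must" fires at this position
    obtain ⟨x, hx⟩ := List.isPrefixOf_iff_prefix.mp h2
    rw [eK2] at hx
    have hdrop : List.drop 8 (c :: t) = x := by rw [← hx]; rfl
    rw [hdrop] at ih
    rw [altScan, if_neg h1, if_pos h2, hdrop, ← hx, eR2]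
    simp only [rep1, rep2, rep3, rep4] at ih ⊢
    rw [repOne_append_absent 'I' K1t _ ('Y' :: K2t) _ (by simp [K2t]),
        repOne_fire,
        repOne_append_absent 'T' K3t _ ('I' :: R2t) _ (by simp [R2t]),
        repOne_append_absent 'Y' K4t _ ('I' :: R2t) _ (by simp [R2t]), ih]
  | case4 c t h1 h2 h3 ih =>
    -- "This is required" fires at this position
    obtain ⟨x, hx⟩ := List.isPrefixOf_iff_prefix.mp h3
    rw [eK3] at hx
    have hdrop : List.drop 16 (c :: t) = x := by rw [← hx]; rfl
    rw [hdrop] at ih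
    rw [altScan, if_neg h1, if_neg h2, if_pos h3, hdrop, ← hx, eR3]
    simp only [rep1, rep2, rep3, rep4] at ih ⊢
    rw [repOne_append_absent 'I' K1t _ ('T' :: K3t) _ (by simp [K3t]),
        repOne_append_absent 'Y' K2t _ ('T' :: K3t) _ (by simp [K3t]),
        repOne_fire,
        repOne_append_absent 'Y' K4t _ ('T' :: R3t) _ (by simp [R3t]), ih]
  | case5 c t h1 h2 h3 h4 ih =>
    -- "You should" fires at this position
    obtain ⟨x, hx⟩ := List.isPrefixOf_iff_prefix.mp h4
    rw [eK4] at hx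
    have hdrop : List.drop 10 (c :: t) = x := by rw [← hx]; rfl
    rw [hdrop] at ih
    rw [altScan, if_neg h1, if_neg h2, if_neg h3, if_pos h4, hdrop, ← hx, eR4]
    simp only [rep1, rep2, rep3, rep4] at ih ⊢
    rw [repOne_append_absent 'I' K1t _ ('Y' :: K4t) _ (by simp [K4t]),
        rep2_skips_K4,
        repOne_append_absent 'T' K3t _ ('Y' :: K4t) _ (by simp [K4t]),
        repOne_fire, ih]
  | case6 c t h1 h2 h3 h4 ih =>
    -- no phrase fires at this position: every pass copies the character c
    rw [altScan, if_neg h1, if_neg h2, if_neg h3, if_neg h4]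
    rw [eK1] at h1; rw [eK2] at h2; rw [eK3] at h3; rw [eK4] at h4
    simp only [rep1, rep2, rep3, rep4] at ih ⊢
    rw [repOne_step _ _ _ _ _ h1]
    have p2 := prefix_stable_cons 'I' 'I' K1t R1t c 'Y' K2t (by simp [K2t]) t
    rw [repOne_step 'Y' K2t _ c _ (by rw [p2]; exact h2)]
    have p3a := prefix_stable_cons 'Y' 'I' K2t R2t c 'T' K3t (by simp [K3t])
      (repOne 'I' K1t ('I' :: R1t) t)
    have p3b := prefix_stable_cons 'I' 'I' K1t R1t c 'T' K3t (by simp [K3t]) t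
    rw [repOne_step 'T' K3t _ c _ (by rw [p3a, p3b]; exact h3)]
    have p4a := prefix_stable_cons 'T' 'T' K3t R3t c 'Y' K4t (by simp [K4t])
      (repOne 'Y' K2t ('I' :: R2t) (repOne 'I' K1t ('I' :: R1t) t))
    have p4b := prefix_stable_cons 'Y' 'I' K2t R2t c 'Y' K4t (by simp [K4t])
      (repOne 'I' K1t ('I' :: R1t) t)
    have p4c := prefix_stable_cons 'I' 'I' K1t R1t c 'Y' K4t (by simp [K4t]) t
    rw [repOne_step 'Y' K4t _ c _ (by rw [p4a, p4b, p4c]; exact h4)]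
    rw [ih]

-- ===== VERDICT (by name: the statement is the Claim_ definition above) =====
theorem make_indirect_py_spec : Claim_equal_make_indirect_py := by
  intro message _
  unfold Spec_make_indirect_py make_indirect_py make_indirect_py_alt
  simp only [PySem.Str.replace, String.toList_ofList]
  apply congrArg
  rw [eK1, eK2, eK3, eK4, eR1, eR2, eR3, eR4,
      replace_eq_repOne, replace_eq_repOne, replace_eq_repOne, replace_eq_repOne]
  have h := master message.toList
  simp only [rep1, rep2, rep3, rep4] at h
  exact h
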